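-- pv_equiv track=rewrite | github.com/OTOYO1020/ChatDev_Intermediate | WareHouse/E_287__20250506104644/lcp_calculator.py | find_max_lcp
-- ===== SOURCE A (Python) =====
-- def lcp(x, y):
--     '''
--     Compute the longest common prefix between two strings x and y.
--     '''
--     min_length = min(len(x), len(y))
--     for i in range(min_length):
--         if x[i] != y[i]:
--             return i
--     return min_length
--
-- def find_max_lcp(strings):
--     '''
--     Find the maximum LCP value among all pairs of strings.
--     '''
--     max_lcp = 0
--     n = len(strings)
--     for i in range(n):
--         for j in range(n):
--             if i != j:
--                 current_lcp = lcp(strings[i], strings[j])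
--                 max_lcp = max(max_lcp, current_lcp)
--     return max_lcp
-- ===== SOURCE B (Python) =====
-- def _lcp(x, y):
--     m = min(len(x), len(y))
--     i = 0
--     while i < m and x[i] == y[i]:
--         i += 1
--     return i
--
-- def find_max_lcp(strings):
--     ss = sorted(strings)
--     best = 0
--     for a, b in zip(ss, ss[1:]):
--         best = max(best, _lcp(a, b))
--     return best
-- ===== Notes on version B (the rewrite author's own statement) =====
-- stated objective: faster
-- what changed: Instead of comparing all O(n^2) ordered pairs, B sorts the strings lexicographically and takes the maximum LCP over adjacent pairs only, which is sound because for sorted a<=b<=c the LCP of a and c is at most the LCP of a and b.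
import Mathlib
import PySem

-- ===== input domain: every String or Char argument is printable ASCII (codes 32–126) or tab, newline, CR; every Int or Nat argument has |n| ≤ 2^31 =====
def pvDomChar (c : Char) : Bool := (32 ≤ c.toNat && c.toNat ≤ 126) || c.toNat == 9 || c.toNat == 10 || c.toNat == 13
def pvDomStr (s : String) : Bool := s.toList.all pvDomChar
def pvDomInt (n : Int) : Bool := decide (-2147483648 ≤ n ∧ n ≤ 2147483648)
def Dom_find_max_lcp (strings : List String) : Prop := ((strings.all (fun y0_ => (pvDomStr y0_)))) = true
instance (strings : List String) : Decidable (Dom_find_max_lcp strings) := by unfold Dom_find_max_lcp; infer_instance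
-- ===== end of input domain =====

-- B replaces A's all-pairs O(n^2·L) scan by sort + adjacent-pairs scan (max LCP is attained
-- by a lexicographically adjacent pair); equivalence of return values is proved below.

-- ===== PORT A =====
-- A's lcp: 'for i in range(min_length): if x[i] != y[i]: return i; return min_length'
def lcpA_loop (x y : String) (idxs : List Int) (min_length : Int) : Int :=
  match idxs with
  | [] => min_length
  | i :: rest =>
      if PySem.Str.pyGet? x i ≠ PySem.Str.pyGet? y i then i
      else lcpA_loop x y rest min_length

def lcpA (x y : String) : Int :=
  let min_length := min (PySem.Str.len x) (PySem.Str.len y)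
  lcpA_loop x y (PySem.List.pyRange 0 min_length 1) min_length

def find_max_lcp (strings : List String) : Int :=
  let n : Int := strings.length
  (PySem.List.pyRange 0 n 1).foldl (fun max_lcp i =>
    (PySem.List.pyRange 0 n 1).foldl (fun max_lcp j =>
      if i ≠ j then
        max max_lcp (lcpA (PySem.List.pyGetD strings i "") (PySem.List.pyGetD strings j ""))
      else max_lcp) max_lcp) 0

-- ===== PORT B =====
-- B's _lcp: 'i = 0; while i < m and x[i] == y[i]: i += 1; return i'
def lcpB_loop (x y : String) (m : Int) (i : Int) : Int :=
  if h : i < m ∧ PySem.Str.pyGet? x i = PySem.Str.pyGet? y i then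
    lcpB_loop x y m (i + 1)
  else i
termination_by (m - i).toNat
decreasing_by omega

def lcpB (x y : String) : Int :=
  let m := min (PySem.Str.len x) (PySem.Str.len y)
  lcpB_loop x y m 0

def find_max_lcp_alt (strings : List String) : Int :=
  let ss := PySem.List.sorted strings (fun s => s) false
  (ss.zip (ss.drop 1)).foldl (fun best p => max best (lcpB p.1 p.2)) 0

-- ===== PRECONDITION & SPEC =====
def Spec_find_max_lcp (strings : List String) (out : Int) : Prop := out = find_max_lcp_alt strings
instance (strings : List String) (out : Int) : Decidable (Spec_find_max_lcp strings out) := by unfold Spec_find_max_lcp; infer_instance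

-- ===== CLAIM (what is proved, stated in full; the proofs are below) =====
def Claim_equal_find_max_lcp : Prop := ∀ (strings : List String), Dom_find_max_lcp strings → Spec_find_max_lcp strings (find_max_lcp strings)

-- ===== LEMMAS AND PROOFS =====

-- Specification-side longest common prefix, on char lists, in Nat.
def lcpN : List Char → List Char → Nat
  | a :: as, b :: bs => if a = b then lcpN as bs + 1 else 0
  | _, _ => 0

-- max of f over a list (0 for [])
def smax {α : Type} (f : α → Nat) : List α → Nat
  | [] => 0
  | x :: t => max (f x) (smax f t)

-- max of lcpN over all unordered pairs
def pm : List (List Char) → Nat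
  | [] => 0
  | x :: t => max (smax (lcpN x) t) (pm t)

theorem lcpN_comm (a b : List Char) : lcpN a b = lcpN b a := by
  induction a generalizing b with
  | nil => cases b <;> rfl
  | cons x as ih =>
    cases b with
    | nil => rfl
    | cons y bs =>
      simp only [lcpN, ih bs]
      by_cases h : x = y
      · simp [h]
      · rw [if_neg h, if_neg fun hh => h hh.symm]

theorem lcpN_nil_right (a : List Char) : lcpN a [] = 0 := by
  cases a <;> rfl

-- decompose lexicographic ≤ on Char lists
theorem le_cons_iff (x y : Char) (a b : List Char) :
    x :: a ≤ y :: b ↔ x < y ∨ (x = y ∧ a ≤ b) := by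
  constructor
  · intro h
    rcases lt_or_eq_of_le h with h | h
    · cases h with
      | rel hr => exact Or.inl hr
      | cons ht => exact Or.inr ⟨rfl, le_of_lt ht⟩
    · injection h with h1 h2; exact Or.inr ⟨h1, le_of_eq h2⟩
  · intro h
    rcases h with h | ⟨rfl, h⟩
    · exact le_of_lt (List.Lex.rel h)
    · rcases lt_or_eq_of_le h with h | h
      · exact le_of_lt (List.Lex.cons h)
      · rw [h]

theorem not_cons_le_nil (x : Char) (a : List Char) : ¬ (x :: a ≤ ([] : List Char)) := by
  intro h
  rcases lt_or_eq_of_le h with h | h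
  · cases h
  · simp at h

-- squeeze: a ≤ b ≤ c lexicographically ⇒ lcpN a c ≤ lcpN a b
theorem lcpN_squeeze (a b c : List Char) (hab : a ≤ b) (hbc : b ≤ c) :
    lcpN a c ≤ lcpN a b := by
  induction a generalizing b c with
  | nil => cases c <;> simp [lcpN]
  | cons x as ih =>
    cases c with
    | nil => simp [lcpN]
    | cons z cs =>
      by_cases hxz : x = z
      · subst hxz
        cases b with
        | nil => exact absurd hab (not_cons_le_nil _ _)
        | cons y bs =>
          rw [le_cons_iff] at hab hbc
          rcases hab with h1 | ⟨rfl, h1⟩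
          · rcases hbc with h2 | ⟨heq, h2⟩
            · exact absurd (h1.trans h2) (lt_irrefl x)
            · exact absurd (heq ▸ h1) (lt_irrefl _)
          · rcases hbc with h2 | ⟨_, h2⟩
            · exact absurd h2 (lt_irrefl x)
            · simp only [lcpN, if_pos]
              exact Nat.succ_le_succ (ih bs cs h1 h2)
      · simp [lcpN, hxz]

-- generic fold lemmas
theorem foldl_max_eq_smax {α : Type} (f : α → Nat) (l : List α) (a : Nat) :
    l.foldl (fun acc x => max acc (f x)) a = max a (smax f l) := by
  induction l generalizing a with
  | nil => simp [smax]
  | cons x t ih => simp [List.foldl, smax, ih, Nat.max_assoc]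

theorem foldl_guard_max_eq_smax {α : Type} (p : α → Prop) [DecidablePred p]
    (f : α → Nat) (l : List α) (a : Nat) :
    l.foldl (fun acc x => if p x then max acc (f x) else acc) a
      = max a (smax (fun x => if p x then f x else 0) l) := by
  induction l generalizing a with
  | nil => simp [smax]
  | cons x t ih =>
    simp only [List.foldl, smax]
    by_cases h : p x
    · rw [if_pos h, if_pos h, ih]; omega
    · rw [if_neg h, if_neg h, ih]; omega

theorem smax_cons {α : Type} (f : α → Nat) (x : α) (t : List α) :
    smax f (x :: t) = max (f x) (smax f t) := rfl

theorem smax_congr {α : Type} (f g : α → Nat) (l : List α)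
    (h : ∀ x ∈ l, f x = g x) : smax f l = smax g l := by
  induction l with
  | nil => rfl
  | cons x t ih =>
    have h1 : f x = g x := h x (by simp)
    have h2 : smax f t = smax g t := ih fun y hy => h y (by simp [hy])
    rw [smax, smax, h1, h2]

theorem smax_append {α : Type} (f : α → Nat) (l l' : List α) :
    smax f (l ++ l') = max (smax f l) (smax f l') := by
  induction l with
  | nil => simp [smax]
  | cons x t ih => rw [List.cons_append, smax, smax, ih]; omega

theorem smax_pair {α : Type} (f g : α → Nat) (l : List α) :
    smax (fun x => max (f x) (g x)) l = max (smax f l) (smax g l) := by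
  induction l with
  | nil => rfl
  | cons x t ih => simp only [smax, ih]; omega

theorem smax_map {α β : Type} (f : β → Nat) (g : α → β) (l : List α) :
    smax f (l.map g) = smax (fun x => f (g x)) l := by
  induction l with
  | nil => rfl
  | cons x t ih => simp [smax, ih]

theorem smax_perm {α : Type} (f : α → Nat) {l l' : List α} (h : l.Perm l') :
    smax f l = smax f l' := by
  induction h with
  | nil => rfl
  | cons x _ ih => simp [smax, ih]
  | swap x y l => simp [smax]; omega
  | trans _ _ ih1 ih2 => exact ih1.trans ih2

theorem smax_le {α : Type} (f : α → Nat) (l : List α) (c : Nat)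
    (h : ∀ x ∈ l, f x ≤ c) : smax f l ≤ c := by
  induction l with
  | nil => exact Nat.zero_le c
  | cons x t ih =>
    simp [smax]
    exact ⟨h x (by simp), ih fun y hy => h y (by simp [hy])⟩

-- pm is invariant under permutation
theorem pm_perm {l l' : List (List Char)} (h : l.Perm l') : pm l = pm l' := by
  induction h with
  | nil => rfl
  | cons x h ih => simp [pm, ih, smax_perm _ h]
  | swap x y l =>
    simp [pm, smax, lcpN_comm x y]
    omega
  | trans _ _ ih1 ih2 => exact ih1.trans ih2

-- pm over an append of a single element
theorem pm_append_singleton (l : List (List Char)) (c : List Char) :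
    pm (l ++ [c]) = max (pm l) (smax (lcpN c) l) := by
  induction l with
  | nil => simp [pm, smax]
  | cons x t ih =>
    simp [pm, ih, smax_append, smax, lcpN_comm x c]
    omega

-- loop specs: both lcp loops compute lcpN
theorem lcpN_drop_min (x y : List Char) (k : Nat) (hk : k = min x.length y.length) :
    lcpN (x.drop k) (y.drop k) = 0 := by
  rcases Nat.le_total x.length y.length with h | h
  · rw [Nat.min_eq_left h] at hk
    rw [hk, List.drop_length]; rfl
  · rw [Nat.min_eq_right h] at hk
    rw [hk, List.drop_length, lcpN_nil_right]

theorem lcpN_drop_lt (x y : List Char) (k : Nat) (hk : k < min x.length y.length) :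
    lcpN (x.drop k) (y.drop k)
      = if x[k]'(by omega) = y[k]'(by omega) then lcpN (x.drop (k+1)) (y.drop (k+1)) + 1 else 0 := by
  rw [List.drop_eq_getElem_cons (l := x) (by omega), List.drop_eq_getElem_cons (l := y) (by omega)]
  rfl

theorem getElem?_eq_iff_getElem (x y : List Char) (k : Nat) (hx : k < x.length) (hy : k < y.length) :
    (x[k]? = y[k]?) ↔ x[k] = y[k] := by
  simp [List.getElem?_eq_getElem hx, List.getElem?_eq_getElem hy]

theorem lcpA_loop_spec (x y : String) (m : Nat) (hm : m = min x.toList.length y.toList.length) :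
    ∀ k : Nat, k ≤ m →
      lcpA_loop x y (PySem.List.pyRange k m 1) m = (k : Int) + lcpN (x.toList.drop k) (y.toList.drop k) := by
  intro k hk
  induction hd : m - k generalizing k with
  | zero =>
    have hkm : k = m := by omega
    rw [hkm, PySem.List.pyRange_one_eq_nil (le_refl _), lcpA_loop, lcpN_drop_min _ _ _ (by omega)]
    simp
  | succ d ih =>
    have hklt : k < m := by omega
    rw [PySem.List.pyRange_one_cons (by exact_mod_cast hklt), lcpA_loop]
    have hx : k < x.toList.length := by omega
    have hy : k < y.toList.length := by omega
    simp only [PySem.Str.pyGet?_natCast]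
    by_cases heq : x.toList[k] = y.toList[k]
    · rw [if_neg (by simp [(getElem?_eq_iff_getElem _ _ _ hx hy).2 heq])]
      have : ((k:Int) + 1) = ((k+1 : Nat) : Int) := by push_cast; ring
      rw [this, ih (k+1) (by omega) (by omega)]
      have hmin : k < min x.toList.length y.toList.length := by omega
      rw [lcpN_drop_lt _ _ _ hmin, if_pos heq]
      push_cast; ring
    · rw [if_pos (by simp [getElem?_eq_iff_getElem _ _ _ hx hy, heq])]
      have hmin : k < min x.toList.length y.toList.length := by omega
      rw [lcpN_drop_lt _ _ _ hmin, if_neg heq]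
      simp

theorem lcpA_eq (x y : String) : lcpA x y = (lcpN x.toList y.toList : Int) := by
  unfold lcpA
  have hlen : min (PySem.Str.len x) (PySem.Str.len y)
      = ((min x.toList.length y.toList.length : Nat) : Int) := by
    simp only [PySem.Str.len]
    exact (Nat.cast_min ..).symm
  rw [hlen]
  have := lcpA_loop_spec x y (min x.toList.length y.toList.length) rfl 0 (by omega)
  simpa using this

theorem lcpB_loop_spec (x y : String) (m : Nat) (hm : m = min x.toList.length y.toList.length) :
    ∀ k : Nat, k ≤ m →
      lcpB_loop x y (m : Int) (k : Int) = (k : Int) + lcpN (x.toList.drop k) (y.toList.drop k) := by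
  intro k hk
  induction hd : m - k generalizing k with
  | zero =>
    have hkm : k = m := by omega
    rw [lcpB_loop, dif_neg (by simp [hkm])]
    rw [lcpN_drop_min _ _ _ (by omega)]
    simp
  | succ d ih =>
    have hklt : k < m := by omega
    have hx : k < x.toList.length := by omega
    have hy : k < y.toList.length := by omega
    rw [lcpB_loop]
    simp only [PySem.Str.pyGet?_natCast]
    by_cases heq : x.toList[k] = y.toList[k]
    · rw [dif_pos ⟨by exact_mod_cast hklt, (getElem?_eq_iff_getElem _ _ _ hx hy).2 heq⟩]
      have : ((k:Int) + 1) = ((k+1 : Nat) : Int) := by push_cast; ring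
      rw [this, ih (k+1) (by omega) (by omega)]
      have hmin : k < min x.toList.length y.toList.length := by omega
      rw [lcpN_drop_lt _ _ _ hmin, if_pos heq]
      push_cast; ring
    · rw [dif_neg (by rw [getElem?_eq_iff_getElem _ _ _ hx hy]; tauto)]
      have hmin : k < min x.toList.length y.toList.length := by omega
      rw [lcpN_drop_lt _ _ _ hmin, if_neg heq]
      simp

theorem lcpB_eq (x y : String) : lcpB x y = (lcpN x.toList y.toList : Int) := by
  unfold lcpB
  have hlen : min (PySem.Str.len x) (PySem.Str.len y)
      = ((min x.toList.length y.toList.length : Nat) : Int) := by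
    simp only [PySem.Str.len]
    exact (Nat.cast_min ..).symm
  rw [hlen]
  have := lcpB_loop_spec x y (min x.toList.length y.toList.length) rfl 0 (by omega)
  simpa using this


-- ported loops ⇒ spec folds, and the index/enumerate bridge
theorem fst_enumerate_lt (L : List String) (p : Int × String)
    (hp : p ∈ PySem.List.enumerate L 0) : 0 ≤ p.1 ∧ p.1 < L.length := by
  have h1 : p.1 ∈ (PySem.List.enumerate L 0).map (·.1) := List.mem_map_of_mem hp
  rw [PySem.List.map_fst_enumerate] at h1
  rw [PySem.List.mem_pyRange_one] at h1
  constructor <;> [exact h1.1; simpa using h1.2]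

-- the double index loop, in Nat smax form, equals pm
theorem FN_eq_pm (L : List String) :
    smax (fun p : Int × String =>
        smax (fun q : Int × String => if p.1 ≠ q.1 then lcpN p.2.toList q.2.toList else 0)
          (PySem.List.enumerate L 0))
      (PySem.List.enumerate L 0) = pm (L.map String.toList) := by
  induction L using List.reverseRecOn with
  | nil => rfl
  | append_singleton T x ih =>
    have henum : PySem.List.enumerate (T ++ [x]) 0
        = PySem.List.enumerate T 0 ++ [((T.length : Int), x)] := by
      rw [PySem.List.enumerate_append]
      norm_num
    rw [henum, smax_append]
    have hnew : smax (fun q : Int × String =>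
          if (T.length : Int) ≠ q.1 then lcpN x.toList q.2.toList else 0)
        (PySem.List.enumerate T 0 ++ [((T.length : Int), x)])
        = smax (fun s => lcpN x.toList s.toList) T := by
      rw [smax_append]
      have h1 : smax (fun q : Int × String =>
            if (T.length : Int) ≠ q.1 then lcpN x.toList q.2.toList else 0)
          (PySem.List.enumerate T 0)
          = smax (fun q : Int × String => lcpN x.toList q.2.toList)
            (PySem.List.enumerate T 0) := by
        apply smax_congr
        intro q hq
        have := fst_enumerate_lt T q hq
        rw [if_pos (by omega)]
      rw [h1]
      have h2 : smax (fun q : Int × String => lcpN x.toList q.2.toList)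
          (PySem.List.enumerate T 0) = smax (fun s => lcpN x.toList s.toList) T := by
        have := smax_map (fun s : String => lcpN x.toList s.toList) (fun q : Int × String => q.2)
          (PySem.List.enumerate T 0)
        rw [PySem.List.map_snd_enumerate] at this
        rw [← this]
      rw [h2]
      simp [smax]
    have hold : smax (fun p : Int × String =>
          smax (fun q : Int × String => if p.1 ≠ q.1 then lcpN p.2.toList q.2.toList else 0)
            (PySem.List.enumerate T 0 ++ [((T.length : Int), x)]))
        (PySem.List.enumerate T 0)
        = max (pm (T.map String.toList)) (smax (fun s => lcpN x.toList s.toList) T) := by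
      have hcg : ∀ p ∈ PySem.List.enumerate T 0,
          smax (fun q : Int × String => if p.1 ≠ q.1 then lcpN p.2.toList q.2.toList else 0)
            (PySem.List.enumerate T 0 ++ [((T.length : Int), x)])
          = max (smax (fun q : Int × String => if p.1 ≠ q.1 then lcpN p.2.toList q.2.toList else 0)
              (PySem.List.enumerate T 0)) (lcpN p.2.toList x.toList) := by
        intro p hp
        rw [smax_append]
        have := fst_enumerate_lt T p hp
        simp only [smax]
        rw [if_pos (by omega)]
        simp
      rw [smax_congr _ _ _ hcg, smax_pair, ih]
      congr 1
      have h3 : smax (fun p : Int × String => lcpN p.2.toList x.toList)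
          (PySem.List.enumerate T 0) = smax (fun s : String => lcpN s.toList x.toList) T := by
        have := smax_map (fun s : String => lcpN s.toList x.toList) (fun q : Int × String => q.2)
          (PySem.List.enumerate T 0)
        rw [PySem.List.map_snd_enumerate] at this
        rw [← this]
      rw [h3]
      exact smax_congr _ _ _ fun s _ => lcpN_comm s.toList x.toList
    rw [hold]
    simp only [smax, Nat.max_zero]
    rw [hnew, List.map_append]
    rw [show List.map String.toList [x] = [x.toList] from rfl, pm_append_singleton]
    have h4 : smax (lcpN x.toList) (T.map String.toList)
        = smax (fun s => lcpN x.toList s.toList) T := smax_map _ _ _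
    rw [h4]
    omega

-- Int/Nat cast bridges for the running-max loops
theorem foldl_max_cast {α : Type} (f : α → Nat) (l : List α) (b : Nat) :
    l.foldl (fun a x => max a ((f x : Nat) : Int)) (b : Int)
      = ((l.foldl (fun a x => max a (f x)) b : Nat) : Int) := by
  induction l generalizing b with
  | nil => rfl
  | cons x t ih =>
    simp only [List.foldl]
    rw [show max (b : Int) (f x : Int) = ((max b (f x) : Nat) : Int) by
      rw [Nat.cast_max], ih]

theorem foldl_guard_max_cast {α : Type} (p : α → Prop) [DecidablePred p]
    (f : α → Nat) (l : List α) (b : Nat) :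
    l.foldl (fun a x => if p x then max a ((f x : Nat) : Int) else a) (b : Int)
      = ((l.foldl (fun a x => if p x then max a (f x) else a) b : Nat) : Int) := by
  induction l generalizing b with
  | nil => rfl
  | cons x t ih =>
    simp only [List.foldl]
    by_cases h : p x
    · rw [if_pos h, if_pos h,
        show max (b : Int) (f x : Int) = ((max b (f x) : Nat) : Int) by rw [Nat.cast_max], ih]
    · rw [if_neg h, if_neg h, ih]

theorem dbl_cast (F E : List (Int × String)) (b : Nat) :
    E.foldl (fun a p => F.foldl (fun a q =>
        if p.1 ≠ q.1 then max a ((lcpN p.2.toList q.2.toList : Nat) : Int) else a) a) (b : Int)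
      = ((E.foldl (fun a p => F.foldl (fun a q =>
          if p.1 ≠ q.1 then max a (lcpN p.2.toList q.2.toList) else a) a) b : Nat) : Int) := by
  induction E generalizing b with
  | nil => rfl
  | cons x t ih =>
    simp only [List.foldl]
    rw [foldl_guard_max_cast (fun q : Int × String => x.1 ≠ q.1)
      (fun q => lcpN x.2.toList q.2.toList) F b, ih]

-- A's double loop computes pm
theorem find_max_lcp_eq_pm (strings : List String) :
    find_max_lcp strings = (pm (strings.map String.toList) : Int) := by
  have hmap : PySem.List.enumerate strings 0
      = (PySem.List.pyRange 0 (strings.length : Int) 1).map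
          (fun j => (j, PySem.List.pyGetD strings j "")) := by
    simpa using PySem.List.enumerate_eq_map_pyRange (xs := strings) (d := "")
  have h1 : find_max_lcp strings
      = (PySem.List.enumerate strings 0).foldl (fun a p =>
          (PySem.List.enumerate strings 0).foldl (fun a q =>
            if p.1 ≠ q.1 then max a (lcpA p.2 q.2) else a) a) 0 := by
    unfold find_max_lcp
    rw [hmap]
    simp only [List.foldl_map]
  rw [h1]
  simp only [lcpA_eq]
  rw [show (0 : Int) = ((0 : Nat) : Int) from rfl, dbl_cast]
  congr 1
  simp only [foldl_guard_max_eq_smax]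
  rw [foldl_max_eq_smax]
  rw [Nat.zero_max]
  exact FN_eq_pm strings

-- adjacent max on a sorted list equals pm
theorem adj_smax (l : List String) (hl : l.Pairwise (· ≤ ·)) :
    smax (fun p : String × String => lcpN p.1.toList p.2.toList) (l.zip (l.drop 1))
      = pm (l.map String.toList) := by
  induction l with
  | nil => rfl
  | cons x t ih =>
    cases t with
    | nil => rfl
    | cons y t' =>
      rw [List.pairwise_cons] at hl
      obtain ⟨hx, hl'⟩ := hl
      have htail := ih hl'
      have hdrop : (x :: y :: t').drop 1 = y :: t' := rfl
      rw [hdrop, List.zip_cons_cons, smax_cons]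
      rw [show ((y :: t').zip ((y :: t' : List String).drop 1)) = (y :: t').zip t' from rfl] at htail
      rw [htail]
      simp only [List.map_cons, pm]
      have hrest : smax (lcpN x.toList) (t'.map String.toList) ≤ lcpN x.toList y.toList := by
        apply smax_le
        intro z hz
        rw [List.mem_map] at hz
        obtain ⟨w, hw, rfl⟩ := hz
        have h1 : x ≤ y := hx y (by simp)
        have h2 : y ≤ w := (List.pairwise_cons.1 hl').1 w hw
        exact lcpN_squeeze x.toList y.toList w.toList
          (String.le_iff_toList_le.1 h1) (String.le_iff_toList_le.1 h2)
      rw [smax_cons]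
      omega

-- adjacent max on a sorted list equals pm
theorem adj_eq_pm (l : List String)
    (hl : l.Pairwise (· ≤ ·)) :
    (l.zip (l.drop 1)).foldl (fun best p => max best ((lcpN p.1.toList p.2.toList : Nat) : Int)) 0
      = (pm (l.map String.toList) : Int) := by
  rw [show (0 : Int) = ((0 : Nat) : Int) from rfl, foldl_max_cast, foldl_max_eq_smax,
    Nat.zero_max, adj_smax l hl]

-- ===== VERDICT (by name: the statement is the Claim_ definition above) =====
theorem find_max_lcp_spec : Claim_equal_find_max_lcp := by
  intro strings _
  unfold Spec_find_max_lcp find_max_lcp_alt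
  rw [find_max_lcp_eq_pm]
  have hperm : (PySem.List.sorted strings (fun s => s) false).Perm strings :=
    PySem.List.sorted_perm strings (fun s => s) false
  have hpair : (PySem.List.sorted strings (fun s => s) false).Pairwise (· ≤ ·) :=
    PySem.List.sorted_pairwise strings (fun s => s)
  have := adj_eq_pm (PySem.List.sorted strings (fun s => s) false) hpair
  simp only [lcpB_eq] at *
  rw [this, pm_perm (List.Perm.map String.toList hperm)]
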